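-- pv_equiv track=rewrite | github.com/ve11yn/meth | meth-backend/segmentor.py | line_array
-- ===== SOURCE A (Python) =====
-- def line_array(x):
--     upper, lower = [], []
--     for y in range(5, len(x) - 5):
--         s_a, s_p = strtline(y, x)
--         e_a, e_p = endline(y, x)
--         if s_a >= 7 and s_p >= 5:
--             upper.append(y)
--         if e_a >= 5 and e_p >= 7:
--             lower.append(y)
--     return upper, lower
--
-- def strtline(y, array):
--     prev, ahead = 0, 0
--     for i in array[y : y + 10]:
--         if i > 3:
--             ahead += 1
--     for i in array[y - 10 : y]:
--         if i == 0:
--             prev += 1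
--     return ahead, prev
--
-- def endline(y, array):
--     ahead = 0
--     prev = 0
--     for i in array[y : y + 10]:
--         if i == 0:
--             ahead += 1
--     for i in array[y - 10 : y]:
--         if i > 3:
--             prev += 1
--     return ahead, prev
-- ===== SOURCE B (Python) =====
-- def line_array(x):
--     # Prefix-sum re-implementation: O(1) per window instead of rescanning 20 elements per y.
--     n = len(x)
--     Z = [0] * (n + 1)  # Z[k] = number of zeros in x[:k]
--     G = [0] * (n + 1)  # G[k] = number of elements > 3 in x[:k]
--     for i, v in enumerate(x):
--         Z[i + 1] = Z[i] + (v == 0)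
--         G[i + 1] = G[i] + (v > 3)
--     upper, lower = [], []
--     for y in range(5, n - 5):
--         hi = min(y + 10, n)
--         ahead_g = G[hi] - G[y]          # count of >3 in x[y:y+10]
--         ahead_z = Z[hi] - Z[y]          # count of ==0 in x[y:y+10]
--         if y >= 10:                     # x[y-10:y] is empty for y < 10 (negative start wraps past y)
--             prev_z = Z[y] - Z[y - 10]
--             prev_g = G[y] - G[y - 10]
--         else:
--             prev_z = prev_g = 0
--         if ahead_g >= 7 and prev_z >= 5:
--             upper.append(y)
--         if ahead_z >= 5 and prev_g >= 7:
--             lower.append(y)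
--     return upper, lower
-- ===== Notes on version B (the rewrite author's own statement) =====
-- stated objective: faster
-- what changed: Replaces A's per-y rescans of the two 10-element windows (four loops per y via strtline/endline) with two prefix-sum tables built in one pass, answering each window count in O(1) by subtraction.
import Mathlib
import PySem

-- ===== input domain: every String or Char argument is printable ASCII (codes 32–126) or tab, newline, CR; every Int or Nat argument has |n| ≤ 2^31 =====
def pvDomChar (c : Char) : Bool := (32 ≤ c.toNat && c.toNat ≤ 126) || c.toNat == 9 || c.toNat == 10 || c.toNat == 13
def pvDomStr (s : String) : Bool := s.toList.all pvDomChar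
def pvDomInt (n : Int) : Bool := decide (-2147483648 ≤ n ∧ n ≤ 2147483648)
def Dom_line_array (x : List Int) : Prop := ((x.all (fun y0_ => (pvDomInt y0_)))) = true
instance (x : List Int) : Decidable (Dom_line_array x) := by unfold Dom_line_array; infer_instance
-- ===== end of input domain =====

-- B replaces A's per-y rescans of the two 10-element windows by two prefix-sum tables
-- with O(1) window queries (objective: faster by a constant factor).

-- ===== PORT A =====
def strtline (y : Int) (array : List Int) : Int × Int :=
  let ahead := (PySem.List.slice array (some y) (some (y + 10))).foldl
    (fun ahead i => if i > 3 then ahead + 1 else ahead) 0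
  let prev := (PySem.List.slice array (some (y - 10)) (some y)).foldl
    (fun prev i => if i == 0 then prev + 1 else prev) 0
  (ahead, prev)

def endline (y : Int) (array : List Int) : Int × Int :=
  let ahead := (PySem.List.slice array (some y) (some (y + 10))).foldl
    (fun ahead i => if i == 0 then ahead + 1 else ahead) 0
  let prev := (PySem.List.slice array (some (y - 10)) (some y)).foldl
    (fun prev i => if i > 3 then prev + 1 else prev) 0
  (ahead, prev)

def line_array (x : List Int) : List Int × List Int :=
  (PySem.List.pyRange 5 ((x.length : Int) - 5) 1).foldl
    (fun (st : List Int × List Int) y =>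
      let s := strtline y x
      let e := endline y x
      let upper := if s.1 ≥ 7 ∧ s.2 ≥ 5 then st.1 ++ [y] else st.1
      let lower := if e.1 ≥ 5 ∧ e.2 ≥ 7 then st.2 ++ [y] else st.2
      (upper, lower))
    ([], [])

-- ===== PORT B =====
-- Source B's index-assignment loop building Z/G is ported as List.scanl (the same prefix table).
def line_array_alt (x : List Int) : List Int × List Int :=
  let Z := List.scanl (fun acc v => acc + (if v == 0 then 1 else 0)) (0 : Int) x
  let G := List.scanl (fun acc v => acc + (if v > 3 then 1 else 0)) (0 : Int) x
  let n : Int := x.length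
  (PySem.List.pyRange 5 (n - 5) 1).foldl
    (fun (st : List Int × List Int) y =>
      let hi := min (y + 10) n
      let ahead_g := G.getD hi.toNat 0 - G.getD y.toNat 0
      let ahead_z := Z.getD hi.toNat 0 - Z.getD y.toNat 0
      let prev_z := if y ≥ 10 then Z.getD y.toNat 0 - Z.getD (y - 10).toNat 0 else 0
      let prev_g := if y ≥ 10 then G.getD y.toNat 0 - G.getD (y - 10).toNat 0 else 0
      let upper := if ahead_g ≥ 7 ∧ prev_z ≥ 5 then st.1 ++ [y] else st.1
      let lower := if ahead_z ≥ 5 ∧ prev_g ≥ 7 then st.2 ++ [y] else st.2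
      (upper, lower))
    ([], [])

-- ===== PRECONDITION & SPEC =====
def Spec_line_array (x : List Int) (out : List Int × List Int) : Prop := out = line_array_alt x
instance (x : List Int) (out : List Int × List Int) : Decidable (Spec_line_array x out) := by unfold Spec_line_array; infer_instance

-- ===== CLAIM (what is proved, stated in full; the proofs are below) =====
def Claim_equal_line_array : Prop := ∀ (x : List Int), Dom_line_array x → Spec_line_array x (line_array x)

-- ===== LEMMAS AND PROOFS =====

-- the k-th entry of the scanl prefix table is the fold over the first k elements
theorem scanl_getD (g : Int → Int → Int) (b : Int) (l : List Int) (k : Nat)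
    (hk : k ≤ l.length) :
    (List.scanl g b l).getD k 0 = (l.take k).foldl g b := by
  induction l generalizing b k with
  | nil =>
    have : k = 0 := by simpa using hk
    subst this
    simp [List.scanl]
  | cons v t ih =>
    cases k with
    | zero => simp [List.scanl]
    | succ k =>
      rw [List.scanl_cons]
      simp only [List.getD_cons_succ, List.take_succ_cons, List.foldl_cons]
      exact ih (g b v) k (by simpa using hk)

-- entry k of B's prefix table counts the matching elements among the first k
theorem prefix_getD (q : Int → Prop) [DecidablePred q] (x : List Int) (k : Nat)
    (hk : k ≤ x.length) :
    (List.scanl (fun acc v => acc + (if q v then 1 else 0)) (0 : Int) x).getD k 0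
      = ((x.take k).countP (fun v => decide (q v)) : Int) := by
  rw [scanl_getD _ _ _ _ hk,
    PySem.List.foldl_add (g := fun v => if q v then (1 : Int) else 0)]
  have hfun : (fun v => if q v then (1 : Int) else 0)
      = (fun v => if decide (q v) = true then (1 : Int) else 0) := by
    funext v; simp
  rw [hfun, PySem.List.sum_map_ite_one_zero]
  ring

-- the "ahead" window x[y:y+10]: A's rescan count = B's prefix-table difference
theorem ahead_eq (q : Int → Prop) [DecidablePred q] (x : List Int) (y : Int)
    (hy : 0 ≤ y) (hyn : y ≤ (x.length : Int)) :
    (PySem.List.slice x (some y) (some (y + 10))).foldl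
        (fun acc i => if q i then acc + 1 else acc) 0
      = (List.scanl (fun acc v => acc + (if q v then 1 else 0)) (0 : Int) x).getD
          (min (y + 10) (x.length : Int)).toNat 0
        - (List.scanl (fun acc v => acc + (if q v then 1 else 0)) (0 : Int) x).getD
          y.toNat 0 := by
  rw [PySem.List.slice_toNat x hy (by omega), PySem.List.foldl_ite_add_one,
    prefix_getD q x _ (by omega), prefix_getD q x _ (by omega)]
  have h1 : (y + 10).toNat - y.toNat = 10 := by omega
  have h2 : (min (y + 10) (x.length : Int)).toNat = min (y.toNat + 10) x.length := by omega
  rw [h1, h2, ← List.take_eq_take_min, List.take_add, List.countP_append]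
  push_cast
  ring

-- the "prev" window x[y-10:y] for y ≥ 10: A's rescan count = B's prefix-table difference
theorem prev_eq (q : Int → Prop) [DecidablePred q] (x : List Int) (y : Int)
    (hy : 10 ≤ y) (hyn : y ≤ (x.length : Int)) :
    (PySem.List.slice x (some (y - 10)) (some y)).foldl
        (fun acc i => if q i then acc + 1 else acc) 0
      = (List.scanl (fun acc v => acc + (if q v then 1 else 0)) (0 : Int) x).getD
          y.toNat 0
        - (List.scanl (fun acc v => acc + (if q v then 1 else 0)) (0 : Int) x).getD
          (y - 10).toNat 0 := by
  rw [PySem.List.slice_toNat x (by omega) (by omega), PySem.List.foldl_ite_add_one,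
    prefix_getD q x _ (by omega), prefix_getD q x _ (by omega)]
  have h1 : (y - 10).toNat = y.toNat - 10 := by omega
  rw [h1]
  set a := y.toNat - 10 with ha
  have h2 : y.toNat - a = 10 := by omega
  have h3 : y.toNat = a + 10 := by omega
  rw [h2, h3, List.take_add, List.countP_append]
  push_cast
  ring

-- for 5 ≤ y < 10 (and the loop nonempty) the slice x[y-10:y] is empty:
-- the negative start wraps to x.length + y - 10, which lies past y
theorem prev_slice_empty (x : List Int) (y : Int) (hy5 : 5 ≤ y) (hy : y < 10)
    (hn : y + 5 < (x.length : Int)) :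
    PySem.List.slice x (some (y - 10)) (some y) = [] := by
  apply List.eq_nil_of_length_eq_zero
  rw [PySem.List.length_slice]
  rw [show y - 10 = -(((10 - y).toNat : Nat) : Int) by omega]
  rw [PySem.List.clampIdx_neg_natCast _ _ (by omega)]
  rw [show y = ((y.toNat : Nat) : Int) by omega, PySem.List.clampIdx_natCast]
  omega

-- ===== VERDICT (by name: the statement is the Claim_ definition above) =====
theorem line_array_spec : Claim_equal_line_array := by
  intro x _
  unfold Spec_line_array
  simp only [line_array, line_array_alt]
  apply PySem.List.foldl_congr_mem
  intro acc y hy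
  rw [PySem.List.mem_pyRange_one] at hy
  obtain ⟨hy5, hyu⟩ := hy
  have hyn : y ≤ (x.length : Int) := by omega
  simp only [strtline, endline]
  have hA3 := ahead_eq (fun i => i > 3) x y (by omega) hyn
  have hA0 := ahead_eq (fun i => i == 0) x y (by omega) hyn
  by_cases h10 : y ≥ 10
  · have hP0 := prev_eq (fun i => i == 0) x y (by omega) hyn
    have hP3 := prev_eq (fun i => i > 3) x y (by omega) hyn
    simp only [hA3, hA0, hP0, hP3]
    simp [h10]
  · have hE := prev_slice_empty x y hy5 (by omega) (by omega)
    simp only [hA3, hA0, hE, List.foldl_nil]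
    simp [h10]
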